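-- pv_equiv track=rewrite | github.com/cosmicgenius/algorithm | python/test2.py | works
-- ===== SOURCE A (Python) =====
-- def works(n):
--     going = True
--     v = [0, 0, 0]
--     while going:
--         going = False
--         if n % 2 == 0:
--             going = True
--             v[0] += 1
--             n //= 2
--         if n % 3 == 0:
--             going = True
--             v[1] += 1
--             n //= 3
--         if n % 5 == 0:
--             going = True
--             v[2] += 1
--             n //= 5
--     if n == 1 or n == -1:
--         return v
--     return None
-- ===== SOURCE B (Python) =====
-- def works(n):
--     # Exponent extraction by recursive doubling: strip p^2 by a recursive call
--     # with the squared modulus, then at most one remaining factor p. This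
--     # replaces A's flag-controlled repeated single divisions with O(log e)
--     # recursion levels per prime.
--     def remove(n, p):
--         if n % p != 0:
--             return 0, n
--         e, m = remove(n, p * p)
--         e *= 2
--         if m % p == 0:
--             e += 1
--             m //= p
--         return e, m
--     v = []
--     for p in (2, 3, 5):
--         e, n = remove(n, p)
--         v.append(e)
--     return v if n in (1, -1) else None
-- ===== Notes on version B (the rewrite author's own statement) =====
-- stated objective: alternative
-- what changed: Replaces A's flag-controlled loop of repeated single divisions by 2, 3, 5 with a recursive-doubling valuation: for each prime, recursively strip p^2 using the squared modulus, then remove at most one leftover factor p, giving O(log e) recursion levels per prime instead of e single divisions.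
import Mathlib
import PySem

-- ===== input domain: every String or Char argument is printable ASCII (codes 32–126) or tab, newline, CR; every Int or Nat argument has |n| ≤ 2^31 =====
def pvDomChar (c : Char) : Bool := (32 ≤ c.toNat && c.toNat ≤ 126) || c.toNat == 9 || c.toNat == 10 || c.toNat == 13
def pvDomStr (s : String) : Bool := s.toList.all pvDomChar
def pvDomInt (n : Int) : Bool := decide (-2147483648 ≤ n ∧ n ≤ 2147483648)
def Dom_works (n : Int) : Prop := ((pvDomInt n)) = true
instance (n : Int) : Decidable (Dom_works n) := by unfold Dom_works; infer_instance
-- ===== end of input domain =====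

-- B replaces A's flag-controlled loop of repeated single divisions with a
-- recursive-doubling valuation (strip p^2 via a recursive call on the squared
-- modulus, then at most one leftover factor p): a different algorithm, same values.

-- ===== PORT A =====
-- one 'if n % p == 0: going=True; cnt+=1; n//=p' block of A's loop body
def tryDiv (p : Int) (going : Bool) (cnt n : Int) : Bool × Int × Int :=
  if PySem.Int.mod n p = 0 then (true, cnt + 1, PySem.Int.floordiv n p)
  else (going, cnt, n)

-- A's 'while going' loop; the fuel only guards totality (ample for n ≠ 0)
def worksLoop : Nat → Int → Int → Int → Int → Int × Int × Int × Int
  | 0, n, v0, v1, v2 => (n, v0, v1, v2)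
  | fuel+1, n, v0, v1, v2 =>
    let (g1, v0', n1) := tryDiv 2 false v0 n
    let (g2, v1', n2) := tryDiv 3 g1 v1 n1
    let (g3, v2', n3) := tryDiv 5 g2 v2 n2
    if g3 then worksLoop fuel n3 v0' v1' v2' else (n3, v0', v1', v2')

def works (n : Int) : Option (List Int) :=
  let (m, a, b, c) := worksLoop (n.natAbs + 1) n 0 0 0
  if m = 1 ∨ m = -1 then some [a, b, c] else none

-- ===== PORT B =====
-- Source B's 'remove(n, p)': recursive doubling; fuel only guards totality
-- (ample whenever |n| < p^fuel, which holds for the calls below when n ≠ 0)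
def removeLoop : Nat → Int → Int → Int × Int
  | 0, n, _ => (0, n)
  | fuel+1, n, p =>
    if PySem.Int.mod n p ≠ 0 then (0, n)
    else
      let (e, m) := removeLoop fuel n (p * p)
      let e := e * 2
      if PySem.Int.mod m p = 0 then (e + 1, PySem.Int.floordiv m p) else (e, m)

def works_alt (n : Int) : Option (List Int) :=
  let (a, n1) := removeLoop (n.natAbs + 1) n 2
  let (b, n2) := removeLoop (n1.natAbs + 1) n1 3
  let (c, n3) := removeLoop (n2.natAbs + 1) n2 5
  if n3 = 1 ∨ n3 = -1 then some [a, b, c] else none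

-- ===== PRECONDITION & SPEC =====
-- Pre_ excludes n = 0, on which Python A (and B) loops forever ('while 0 % 2 == 0').
def Pre_works (n : Int) : Prop := n ≠ 0
instance (n : Int) : Decidable (Pre_works n) := by unfold Pre_works; infer_instance
def pvWitness_works : Int := 720

def Spec_works (n : Int) (out : Option (List Int)) : Prop := out = works_alt n
instance (n : Int) (out : Option (List Int)) : Decidable (Spec_works n out) := by unfold Spec_works; infer_instance

-- ===== CLAIM (what is proved, stated in full; the proofs are below) =====
def Claim_equal_works : Prop := ∀ (n : Int), Dom_works n → Pre_works n → Spec_works n (works n)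

-- ===== LEMMAS AND PROOFS =====

-- exact division: if p divides n, floordiv is the exact quotient, nonzero, strictly smaller
lemma step_div (p n : Int) (hp : (2:Int) ≤ p) (hn : n ≠ 0) (h : PySem.Int.mod n p = 0) :
    n = p * PySem.Int.floordiv n p ∧ PySem.Int.floordiv n p ≠ 0 ∧
      (PySem.Int.floordiv n p).natAbs < n.natAbs := by
  have hmul := PySem.Int.floordiv_mul_add_mod n p
  rw [h, add_zero] at hmul
  set q := PySem.Int.floordiv n p with hq
  have heq : n = p * q := by linarith [hmul, mul_comm q p]
  have hq0 : q ≠ 0 := by intro h0; rw [h0, mul_zero] at heq; exact hn heq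
  refine ⟨heq, hq0, ?_⟩
  have : n.natAbs = p.natAbs * q.natAbs := by rw [heq, Int.natAbs_mul]
  have h2 : 2 ≤ p.natAbs := by omega
  have h1 : 1 ≤ q.natAbs := by omega
  calc q.natAbs < 2 * q.natAbs := by omega
    _ ≤ p.natAbs * q.natAbs := Nat.mul_le_mul_right _ h2
    _ = n.natAbs := this.symm

lemma not_dvd_of_mod_ne (p n : Int) (h : ¬ PySem.Int.mod n p = 0) : ¬ p ∣ n := by
  rw [PySem.Int.mod_eq_zero_iff_dvd] at h; exact h

lemma dvd_of_mod_eq (p n : Int) (h : PySem.Int.mod n p = 0) : p ∣ n := by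
  rw [← PySem.Int.mod_eq_zero_iff_dvd]; exact h

lemma tryDiv_pos (p : Int) (g : Bool) (c n : Int) (h : PySem.Int.mod n p = 0) :
    tryDiv p g c n = (true, c + 1, PySem.Int.floordiv n p) := by simp [tryDiv, h]

lemma tryDiv_neg (p : Int) (g : Bool) (c n : Int) (h : ¬ PySem.Int.mod n p = 0) :
    tryDiv p g c n = (g, c, n) := by simp [tryDiv, h]

-- specification of A's loop: it returns the full (2,3,5)-factorisation of n
lemma loopA_spec : ∀ (fuel : Nat) (n : Int), n ≠ 0 → n.natAbs ≤ fuel → ∀ v0 v1 v2 : Int,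
    ∃ (a b c : Nat) (m : Int),
      worksLoop fuel n v0 v1 v2 = (m, v0 + (a:Int), v1 + (b:Int), v2 + (c:Int)) ∧
      n = 2^a * 3^b * 5^c * m ∧ ¬(2:Int) ∣ m ∧ ¬(3:Int) ∣ m ∧ ¬(5:Int) ∣ m := by
  intro fuel
  induction fuel with
  | zero => intro n hn h; exfalso; omega
  | succ fuel ih =>
    intro n hn hfuel v0 v1 v2
    by_cases h2 : PySem.Int.mod n 2 = 0
    · obtain ⟨he2, hz2, hlt2⟩ := step_div 2 n (by norm_num) hn h2
      by_cases h3 : PySem.Int.mod (PySem.Int.floordiv n 2) 3 = 0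
      · obtain ⟨he3, hz3, hlt3⟩ := step_div 3 _ (by norm_num) hz2 h3
        by_cases h5 : PySem.Int.mod (PySem.Int.floordiv (PySem.Int.floordiv n 2) 3) 5 = 0
        · obtain ⟨he5, hz5, hlt5⟩ := step_div 5 _ (by norm_num) hz3 h5
          obtain ⟨a, b, c, m, hres, hfact, hm2, hm3, hm5⟩ :=
            ih _ hz5 (by omega) (v0+1) (v1+1) (v2+1)
          refine ⟨a+1, b+1, c+1, m, ?_, ?_, hm2, hm3, hm5⟩
          · simp only [worksLoop, tryDiv_pos _ _ _ _ h2, tryDiv_pos _ _ _ _ h3,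
              tryDiv_pos _ _ _ _ h5, if_true]
            rw [hres]
            simp only [Prod.mk.injEq, true_and]
            push_cast
            omega
          · rw [he2, he3, he5, hfact]; ring
        · obtain ⟨a, b, c, m, hres, hfact, hm2, hm3, hm5⟩ :=
            ih _ hz3 (by omega) (v0+1) (v1+1) v2
          refine ⟨a+1, b+1, c, m, ?_, ?_, hm2, hm3, hm5⟩
          · simp only [worksLoop, tryDiv_pos _ _ _ _ h2, tryDiv_pos _ _ _ _ h3,
              tryDiv_neg _ _ _ _ h5, if_true]
            rw [hres]
            simp only [Prod.mk.injEq, true_and, and_true]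
            push_cast
            omega
          · rw [he2, he3, hfact]; ring
      · by_cases h5 : PySem.Int.mod (PySem.Int.floordiv n 2) 5 = 0
        · obtain ⟨he5, hz5, hlt5⟩ := step_div 5 _ (by norm_num) hz2 h5
          obtain ⟨a, b, c, m, hres, hfact, hm2, hm3, hm5⟩ :=
            ih _ hz5 (by omega) (v0+1) v1 (v2+1)
          refine ⟨a+1, b, c+1, m, ?_, ?_, hm2, hm3, hm5⟩
          · simp only [worksLoop, tryDiv_pos _ _ _ _ h2, tryDiv_neg _ _ _ _ h3,
              tryDiv_pos _ _ _ _ h5, if_true]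
            rw [hres]
            simp only [Prod.mk.injEq, true_and]
            push_cast
            omega
          · rw [he2, he5, hfact]; ring
        · obtain ⟨a, b, c, m, hres, hfact, hm2, hm3, hm5⟩ :=
            ih _ hz2 (by omega) (v0+1) v1 v2
          refine ⟨a+1, b, c, m, ?_, ?_, hm2, hm3, hm5⟩
          · simp only [worksLoop, tryDiv_pos _ _ _ _ h2, tryDiv_neg _ _ _ _ h3,
              tryDiv_neg _ _ _ _ h5, if_true]
            rw [hres]
            simp only [Prod.mk.injEq, true_and, and_true]
            push_cast
            omega
          · rw [he2, hfact]; ring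
    · by_cases h3 : PySem.Int.mod n 3 = 0
      · obtain ⟨he3, hz3, hlt3⟩ := step_div 3 n (by norm_num) hn h3
        by_cases h5 : PySem.Int.mod (PySem.Int.floordiv n 3) 5 = 0
        · obtain ⟨he5, hz5, hlt5⟩ := step_div 5 _ (by norm_num) hz3 h5
          obtain ⟨a, b, c, m, hres, hfact, hm2, hm3, hm5⟩ :=
            ih _ hz5 (by omega) v0 (v1+1) (v2+1)
          refine ⟨a, b+1, c+1, m, ?_, ?_, hm2, hm3, hm5⟩
          · simp only [worksLoop, tryDiv_neg _ _ _ _ h2, tryDiv_pos _ _ _ _ h3,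
              tryDiv_pos _ _ _ _ h5, if_true]
            rw [hres]
            simp only [Prod.mk.injEq, true_and]
            push_cast
            omega
          · rw [he3, he5, hfact]; ring
        · obtain ⟨a, b, c, m, hres, hfact, hm2, hm3, hm5⟩ :=
            ih _ hz3 (by omega) v0 (v1+1) v2
          refine ⟨a, b+1, c, m, ?_, ?_, hm2, hm3, hm5⟩
          · simp only [worksLoop, tryDiv_neg _ _ _ _ h2, tryDiv_pos _ _ _ _ h3,
              tryDiv_neg _ _ _ _ h5, if_true]
            rw [hres]
            simp only [Prod.mk.injEq, true_and, and_true]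
            push_cast
            omega
          · rw [he3, hfact]; ring
      · by_cases h5 : PySem.Int.mod n 5 = 0
        · obtain ⟨he5, hz5, hlt5⟩ := step_div 5 n (by norm_num) hn h5
          obtain ⟨a, b, c, m, hres, hfact, hm2, hm3, hm5⟩ :=
            ih _ hz5 (by omega) v0 v1 (v2+1)
          refine ⟨a, b, c+1, m, ?_, ?_, hm2, hm3, hm5⟩
          · simp only [worksLoop, tryDiv_neg _ _ _ _ h2, tryDiv_neg _ _ _ _ h3,
              tryDiv_pos _ _ _ _ h5, if_true]
            rw [hres]
            simp only [Prod.mk.injEq, true_and]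
            push_cast
            omega
          · rw [he5, hfact]; ring
        · refine ⟨0, 0, 0, n, ?_, by norm_num, not_dvd_of_mod_ne _ _ h2,
            not_dvd_of_mod_ne _ _ h3, not_dvd_of_mod_ne _ _ h5⟩
          simp only [worksLoop, tryDiv_neg _ _ _ _ h2, tryDiv_neg _ _ _ _ h3,
            tryDiv_neg _ _ _ _ h5]
          norm_num

-- specification of B's recursive-doubling valuation
lemma sq_pow (p : Int) (e : Nat) : (p * p) ^ e = p ^ (2 * e) := by
  rw [two_mul, pow_add, mul_pow]

lemma remove_spec : ∀ (fuel : Nat) (p n : Int), (2:Int) ≤ p → n ≠ 0 →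
    (n.natAbs : Int) < p ^ fuel →
    ∃ (e : Nat) (m : Int), removeLoop fuel n p = ((e : Int), m) ∧
      n = p ^ e * m ∧ m ≠ 0 ∧ ¬ p ∣ m := by
  intro fuel
  induction fuel with
  | zero =>
    intro p n hp hn hb
    exfalso
    simp only [pow_zero] at hb
    omega
  | succ fuel ih =>
    intro p n hp hn hb
    by_cases h : PySem.Int.mod n p = 0
    · -- p divides n, hence p ≤ |n|, hence fuel ≥ 1 and the (p*p)^fuel bound holds
      have hdvd : p ∣ n := dvd_of_mod_eq p n h
      have hpos : (0:Int) < (n.natAbs : Int) := by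
        exact_mod_cast Int.natAbs_pos.mpr hn
      have hple : p ≤ (n.natAbs : Int) :=
        Int.le_of_dvd hpos (Int.dvd_natAbs.mpr hdvd)
      have hf1 : 1 ≤ fuel := by
        by_contra hf
        have hz : fuel = 0 := by omega
        subst hz
        rw [pow_one] at hb
        omega
      have hb' : (n.natAbs : Int) < (p * p) ^ fuel := by
        have h1 : p ^ (fuel + 1) ≤ p ^ (2 * fuel) :=
          pow_le_pow_right₀ (by omega) (by omega)
        rw [sq_pow]
        linarith
      obtain ⟨e', m', hres', hfact', hm0', hnd'⟩ :=
        ih (p * p) n (by nlinarith) hn hb'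
      by_cases h2 : PySem.Int.mod m' p = 0
      · obtain ⟨heq, hq0, _⟩ := step_div p m' hp hm0' h2
        set q := PySem.Int.floordiv m' p with hqdef
        refine ⟨2 * e' + 1, q, ?_, ?_, hq0, ?_⟩
        · simp only [removeLoop, h, hres', h2, if_true, ← hqdef]
          push_cast
          ring_nf
        · rw [hfact', heq, pow_succ, ← sq_pow]
          ring
        · intro hd
          apply hnd'
          rw [heq]
          exact mul_dvd_mul_left p hd
      · refine ⟨2 * e', m', ?_, ?_, hm0', not_dvd_of_mod_ne p m' h2⟩
        · simp only [removeLoop, h, hres', h2, if_false]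
          push_cast
          ring_nf
        · rw [hfact', sq_pow]
    · refine ⟨0, n, ?_, by rw [pow_zero, one_mul], hn, not_dvd_of_mod_ne p n h⟩
      simp only [removeLoop]
      rw [if_pos h]
      norm_num

-- fuel adequacy: |n| < p^(|n|+1) for p ≥ 2
lemma fuel_ok (p n : Int) (hp : (2:Int) ≤ p) : (n.natAbs : Int) < p ^ (n.natAbs + 1) := by
  have h2 : (n.natAbs : Int) < 2 ^ (n.natAbs + 1) := by
    have h := Nat.lt_two_pow_self (n := n.natAbs)
    have h' : n.natAbs < 2 ^ (n.natAbs + 1) :=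
      lt_of_lt_of_le h (Nat.pow_le_pow_right (by norm_num) (Nat.le_succ _))
    exact_mod_cast h'
  calc (n.natAbs : Int) < 2 ^ (n.natAbs + 1) := h2
    _ ≤ p ^ (n.natAbs + 1) := pow_le_pow_left₀ (by norm_num) hp _

-- uniqueness of the exponent of a prime
lemma pow_unique (p : Int) (hp : Prime p) :
    ∀ (a : Nat) (x : Int) (a' : Nat) (x' : Int),
      p^a * x = p^a' * x' → ¬ p ∣ x → ¬ p ∣ x' → a = a' ∧ x = x' := by
  intro a
  induction a with
  | zero =>
    intro x a' x' heq hx hx'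
    cases a' with
    | zero => simpa using heq
    | succ a' =>
      exfalso; apply hx
      rw [pow_zero, one_mul] at heq
      exact ⟨p^a' * x', by rw [heq, pow_succ]; ring⟩
  | succ a iha =>
    intro x a' x' heq hx hx'
    cases a' with
    | zero =>
      exfalso; apply hx'
      rw [pow_zero, one_mul] at heq
      exact ⟨p^a * x, by rw [← heq, pow_succ]; ring⟩
    | succ a' =>
      have hcancel : p^a * x = p^a' * x' := by
        have h' : p * (p^a * x) = p * (p^a' * x') := by
          rw [pow_succ, pow_succ] at heq
          nlinarith [heq]
        exact mul_left_cancel₀ hp.ne_zero h'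
      obtain ⟨h1, h2⟩ := iha x a' x' hcancel hx hx'
      exact ⟨by omega, h2⟩

lemma nd_mul (p x y : Int) (hp : Prime p) (hx : ¬ p ∣ x) (hy : ¬ p ∣ y) : ¬ p ∣ x * y := by
  intro h; rcases hp.dvd_mul.mp h with h | h
  exacts [hx h, hy h]

lemma nd_pow (p q : Int) (e : Nat) (hp : Prime p) (hq : ¬ p ∣ q) : ¬ p ∣ q ^ e := by
  intro h; exact hq (hp.dvd_of_dvd_pow h)

theorem works_spec : Claim_equal_works := by
  intro n _ hn
  show works n = works_alt n
  obtain ⟨a, b, c, m, hA, hfA, hA2, hA3, hA5⟩ :=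
    loopA_spec (n.natAbs + 1) n hn (Nat.le_succ _) 0 0 0
  obtain ⟨e2, n1, hB2, hf2, hn1, hd2⟩ :=
    remove_spec (n.natAbs + 1) 2 n (by norm_num) hn (fuel_ok 2 n (by norm_num))
  obtain ⟨e3, n2, hB3, hf3, hn2, hd3⟩ :=
    remove_spec (n1.natAbs + 1) 3 n1 (by norm_num) hn1 (fuel_ok 3 n1 (by norm_num))
  obtain ⟨e5, n3, hB5, hf5, hn3, hd5⟩ :=
    remove_spec (n2.natAbs + 1) 5 n2 (by norm_num) hn2 (fuel_ok 5 n2 (by norm_num))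
  have p2 : Prime (2:Int) := Int.prime_two
  have p3 : Prime (3:Int) := Int.prime_three
  have p5 : Prime (5:Int) := by norm_num
  have hd2' : ¬ (2:Int) ∣ n3 := by
    intro h; exact hd2 (by rw [hf3, hf5]; exact Dvd.dvd.mul_left (Dvd.dvd.mul_left h _) _)
  have hd3' : ¬ (3:Int) ∣ n3 := by
    intro h; exact hd3 (by rw [hf5]; exact Dvd.dvd.mul_left h _)
  have hfB : n = 2^e2 * (3^e3 * (5^e5 * n3)) := by rw [hf2, hf3, hf5]
  have heqAB : (2:Int)^a * (3^b * 5^c * m) = 2^e2 * (3^e3 * (5^e5 * n3)) := by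
    rw [← hfB, hfA]; ring
  obtain ⟨ha, hrest2⟩ := pow_unique 2 p2 a (3^b * 5^c * m) e2 (3^e3 * (5^e5 * n3)) heqAB
    (nd_mul 2 _ _ p2 (nd_mul 2 _ _ p2 (nd_pow 2 3 b p2 (by norm_num)) (nd_pow 2 5 c p2 (by norm_num))) hA2)
    (nd_mul 2 _ _ p2 (nd_pow 2 3 e3 p2 (by norm_num))
      (nd_mul 2 _ _ p2 (nd_pow 2 5 e5 p2 (by norm_num)) hd2'))
  rw [mul_assoc] at hrest2
  obtain ⟨hb, hrest3⟩ := pow_unique 3 p3 b (5^c * m) e3 (5^e5 * n3) hrest2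
    (nd_mul 3 _ _ p3 (nd_pow 3 5 c p3 (by norm_num)) hA3)
    (nd_mul 3 _ _ p3 (nd_pow 3 5 e5 p3 (by norm_num)) hd3')
  obtain ⟨hc, hm⟩ := pow_unique 5 p5 c m e5 n3 hrest3 hA5 hd5
  subst ha hb hc hm
  simp only [works, works_alt, hA, hB2, hB3, hB5, zero_add]
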